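-- pv_equiv track=rewrite | github.com/jemg2030/Retos-Python-CheckIO | ESCHER/TheShipTeams.py | two_teams
-- ===== SOURCE A (Python) =====
-- def two_teams(sailors):
--     #replace this for solution
--     team1 = []
--     team2 = []
--
--     for name, age in sailors.items():
--         if age > 40 or age < 20:
--             team1.append(name)
--         else:
--             team2.append(name)
--
--     team1.sort()
--     team2.sort()
--
--     return [team1, team2]
-- ===== SOURCE B (Python) =====
-- def _insert_sorted(lst, x):
--     lo, hi = 0, len(lst)
--     while lo < hi:
--         mid = (lo + hi) // 2
--         if lst[mid] < x:
--             lo = mid + 1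
--         else:
--             hi = mid
--     lst.insert(lo, x)
--
-- def two_teams(sailors):
--     team1 = []
--     team2 = []
--     for name, age in sailors.items():
--         _insert_sorted(team1 if age > 40 or age < 20 else team2, name)
--     return [team1, team2]
-- ===== Notes on version B (the rewrite author's own statement) =====
-- stated objective: alternative
-- what changed: B never calls sort: it keeps each team sorted throughout, inserting every name at the position found by a hand-written binary search (online insertion with bisect_left) in one pass, whereas A appends unordered and sorts each team afterwards.
import Mathlib
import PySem

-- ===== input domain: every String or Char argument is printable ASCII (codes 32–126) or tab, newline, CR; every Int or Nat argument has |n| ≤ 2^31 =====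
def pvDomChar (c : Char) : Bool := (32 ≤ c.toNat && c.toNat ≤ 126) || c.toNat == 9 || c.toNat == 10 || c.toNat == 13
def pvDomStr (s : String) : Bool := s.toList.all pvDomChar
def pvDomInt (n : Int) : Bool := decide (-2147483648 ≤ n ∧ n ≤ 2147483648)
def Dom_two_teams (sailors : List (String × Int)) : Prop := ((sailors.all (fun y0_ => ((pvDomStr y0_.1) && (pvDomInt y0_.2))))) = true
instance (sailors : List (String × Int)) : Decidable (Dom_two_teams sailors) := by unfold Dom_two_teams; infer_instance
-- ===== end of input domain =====

-- B never sorts: it keeps each team sorted throughout, inserting every name at its ordered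
-- position in one pass (online insertion sort), instead of A's append-then-sort-each-team.

-- ===== PORT A =====
-- for name, age in sailors.items(): append to team1/team2; then team1.sort(); team2.sort()
def two_teams (sailors : List (String × Int)) : List (List String) :=
  let st := sailors.foldl
    (fun (st : List String × List String) p =>
      if p.2 > 40 ∨ p.2 < 20 then (st.1 ++ [p.1], st.2) else (st.1, st.2 ++ [p.1]))
    ([], [])
  [PySem.List.sorted st.1 (fun x => x) false, PySem.List.sorted st.2 (fun x => x) false]

-- ===== PORT B =====
-- _insert_sorted: binary search (bisect_left loop) for the position, then list.insert there
def bisectLoop (lst : List String) (x : String) (lo hi : Nat) : Nat :=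
  if lo < hi then
    if lst.getD ((lo + hi) / 2) "" < x then bisectLoop lst x ((lo + hi) / 2 + 1) hi
    else bisectLoop lst x lo ((lo + hi) / 2)
  else lo
termination_by hi - lo
decreasing_by all_goals omega

def insertSorted (lst : List String) (x : String) : List String :=
  PySem.List.insert lst ((bisectLoop lst x 0 lst.length : Nat) : Int) x

-- one pass: each name goes to its ordered place in its team; no sort call
def two_teams_alt (sailors : List (String × Int)) : List (List String) :=
  sailors.foldl
    (fun (st : List String × List String) p =>
      if p.2 > 40 ∨ p.2 < 20 then (insertSorted st.1 p.1, st.2) else (st.1, insertSorted st.2 p.1))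
    ([], [])
  |> fun st => [st.1, st.2]

-- ===== PRECONDITION & SPEC =====
def Spec_two_teams (sailors : List (String × Int)) (out : List (List String)) : Prop := out = two_teams_alt sailors
instance (sailors : List (String × Int)) (out : List (List String)) : Decidable (Spec_two_teams sailors out) := by unfold Spec_two_teams; infer_instance

-- ===== CLAIM (what is proved, stated in full; the proofs are below) =====
def Claim_equal_two_teams : Prop := ∀ (sailors : List (String × Int)), Dom_two_teams sailors → Spec_two_teams sailors (two_teams sailors)

-- ===== LEMMAS AND PROOFS =====

theorem bisectLoop_le (l : List String) (x : String) :
    ∀ (n lo hi : Nat), hi - lo ≤ n → lo ≤ hi →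
      lo ≤ bisectLoop l x lo hi ∧ bisectLoop l x lo hi ≤ hi := by
  intro n
  induction n with
  | zero =>
    intro lo hi hn hlh
    rw [bisectLoop, if_neg (by omega : ¬ lo < hi)]
    omega
  | succ n ih =>
    intro lo hi hn hlh
    by_cases hlt : lo < hi
    · rw [bisectLoop, if_pos hlt]
      split_ifs with hmid
      · have h := ih ((lo + hi) / 2 + 1) hi (by omega) (by omega)
        omega
      · have h := ih lo ((lo + hi) / 2) (by omega) (by omega)
        omega
    · rw [bisectLoop, if_neg hlt]; omega

-- binary-search invariant: everything left of the returned index is < x, everything right is ≥ x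
theorem bisectLoop_spec (l : List String) (x : String) (hl : l.Pairwise (· ≤ ·)) :
    ∀ (n lo hi : Nat), hi - lo ≤ n → hi ≤ l.length →
      (∀ j (hj : j < l.length), j < lo → l[j] < x) →
      (∀ j (hj : j < l.length), hi ≤ j → ¬ l[j] < x) →
      (∀ j (hj : j < l.length), j < bisectLoop l x lo hi → l[j] < x) ∧
      (∀ j (hj : j < l.length), bisectLoop l x lo hi ≤ j → ¬ l[j] < x) := by
  have hmono : ∀ (i j : Nat) (hi : i < l.length) (hj : j < l.length), i ≤ j → l[i] ≤ l[j] := by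
    intro i j hi hj hij
    rcases Nat.eq_or_lt_of_le hij with h | h
    · subst h; exact le_refl _
    · exact (List.pairwise_iff_getElem.mp hl) i j hi hj h
  intro n
  induction n with
  | zero =>
    intro lo hi hn hhi hb ha
    rw [bisectLoop, if_neg (by omega : ¬ lo < hi)]
    exact ⟨fun j hj hjlo => hb j hj hjlo, fun j hj hjlo => ha j hj (by omega)⟩
  | succ n ih =>
    intro lo hi hn hhi hb ha
    by_cases hlt : lo < hi
    · have hmlt : (lo + hi) / 2 < l.length := by omega
      have hgd : l.getD ((lo + hi) / 2) "" = l[(lo + hi) / 2] := List.getD_eq_getElem l "" hmlt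
      rw [bisectLoop, if_pos hlt]
      split_ifs with hx
      · rw [hgd] at hx
        refine ih ((lo + hi) / 2 + 1) hi (by omega) hhi ?_ ha
        intro j hj hjlo
        exact lt_of_le_of_lt (hmono j ((lo + hi) / 2) hj hmlt (by omega)) hx
      · rw [hgd] at hx
        refine ih lo ((lo + hi) / 2) (by omega) (by omega) hb ?_
        intro j hj hjmid
        exact fun hc => hx (lt_of_le_of_lt (hmono ((lo + hi) / 2) j hmlt hj hjmid) hc)
    · rw [bisectLoop, if_neg hlt]
      exact ⟨fun j hj hjlo => hb j hj hjlo, fun j hj hjlo => ha j hj (by omega)⟩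

theorem insertSorted_eq (l : List String) (x : String) :
    insertSorted l x
      = l.take (bisectLoop l x 0 l.length) ++ x :: l.drop (bisectLoop l x 0 l.length) := by
  have hle := (bisectLoop_le l x l.length 0 l.length (by omega) (Nat.zero_le _)).2
  unfold insertSorted
  exact PySem.List.insert_natCast l (bisectLoop l x 0 l.length) x hle

theorem insertSorted_perm (l : List String) (x : String) : (insertSorted l x).Perm (x :: l) := by
  rw [insertSorted_eq]
  have h := List.perm_middle (a := x) (l₁ := l.take (bisectLoop l x 0 l.length))
    (l₂ := l.drop (bisectLoop l x 0 l.length))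
  simpa [List.take_append_drop] using h

theorem insertSorted_pairwise {l : List String} (hl : l.Pairwise (· ≤ ·)) (x : String) :
    (insertSorted l x).Pairwise (· ≤ ·) := by
  rw [insertSorted_eq]
  obtain ⟨hbelow, habove⟩ := bisectLoop_spec l x hl l.length 0 l.length (by omega)
    (le_refl _) (by omega) (by intro j hj hji; omega)
  set r := bisectLoop l x 0 l.length with hr
  have htake : ∀ a ∈ l.take r, a < x := by
    intro a ha
    obtain ⟨j, hj, hja⟩ := List.mem_iff_getElem.mp ha
    have hjl : j < l.length := lt_of_lt_of_le hj (by simp)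
    have : (l.take r)[j] = l[j] := List.getElem_take
    rw [this] at hja
    exact hja ▸ hbelow j hjl (by simp at hj; omega)
  have hdrop : ∀ b ∈ l.drop r, x ≤ b := by
    intro b hb
    obtain ⟨j, hj, hjb⟩ := List.mem_iff_getElem.mp hb
    have hjl : r + j < l.length := by simp at hj; omega
    have : (l.drop r)[j] = l[r + j] := List.getElem_drop
    rw [this] at hjb
    exact hjb ▸ not_lt.mp (habove (r + j) hjl (by omega))
  rw [List.pairwise_append]
  refine ⟨hl.sublist (List.take_sublist r l), ?_, ?_⟩
  · exact List.pairwise_cons.mpr ⟨hdrop, hl.sublist (List.drop_sublist r l)⟩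
  · intro a ha b hb
    rcases List.mem_cons.mp hb with hbx | hbd
    · exact hbx ▸ le_of_lt (htake a ha)
    · exact le_trans (le_of_lt (htake a ha)) (hdrop b hbd)

-- the fold over pairs splits into independent insertion folds over the two filtered sublists
theorem fold_split (l : List (String × Int)) (a b : List String) :
    l.foldl
      (fun (st : List String × List String) p =>
        if p.2 > 40 ∨ p.2 < 20 then (insertSorted st.1 p.1, st.2) else (st.1, insertSorted st.2 p.1))
      (a, b)
    = ((l.filter (fun p => decide (p.2 > 40 ∨ p.2 < 20))).foldl (fun t p => insertSorted t p.1) a,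
       (l.filter (fun p => decide (¬(p.2 > 40 ∨ p.2 < 20)))).foldl (fun t p => insertSorted t p.1) b) := by
  induction l generalizing a b with
  | nil => rfl
  | cons p t ih =>
    by_cases h : p.2 > 40 ∨ p.2 < 20
    · have h' : ¬(p.2 ≤ 40 ∧ 20 ≤ p.2) := by omega
      simp [List.foldl_cons, h, h', ih]
    · have h' : p.2 ≤ 40 ∧ 20 ≤ p.2 := by omega
      simp [List.foldl_cons, h, h', ih]

-- folding insertions produces a sorted permutation of the inserted names
theorem fold_insert_perm (l : List (String × Int)) (a : List String) :
    (l.foldl (fun t p => insertSorted t p.1) a).Perm (a ++ l.map Prod.fst) := by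
  induction l generalizing a with
  | nil => simp
  | cons p t ih =>
    have h1 := ih (insertSorted a p.1)
    have h2 : (insertSorted a p.1 ++ t.map Prod.fst).Perm (a ++ p.1 :: t.map Prod.fst) := by
      have h3 := (insertSorted_perm a p.1).append_right (t.map Prod.fst)
      exact h3.trans (List.perm_middle (a := p.1) (l₁ := a) (l₂ := t.map Prod.fst)).symm
    simpa using h1.trans h2

theorem fold_insert_pairwise (l : List (String × Int)) {a : List String}
    (ha : a.Pairwise (· ≤ ·)) :
    (l.foldl (fun t p => insertSorted t p.1) a).Pairwise (· ≤ ·) := by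
  induction l generalizing a with
  | nil => exact ha
  | cons p t ih => exact ih (insertSorted_pairwise ha p.1)

-- B's team equals Python's sorted of the corresponding filtered name list
theorem fold_insert_eq_sorted (l : List (String × Int)) :
    PySem.List.sorted (l.map Prod.fst) (fun x => x) false
      = l.foldl (fun t p => insertSorted t p.1) [] := by
  apply PySem.List.sorted_id_eq_of_perm_of_pairwise
  · simpa using fold_insert_perm l []
  · exact fold_insert_pairwise l List.Pairwise.nil

-- A's fold splits into the two filters
theorem fold_append_split (l : List (String × Int)) :
    l.foldl
      (fun (st : List String × List String) p =>
        if p.2 > 40 ∨ p.2 < 20 then (st.1 ++ [p.1], st.2) else (st.1, st.2 ++ [p.1]))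
      ([], [])
    = ((l.filter (fun p => decide (p.2 > 40 ∨ p.2 < 20))).map Prod.fst,
       (l.filter (fun p => decide (¬(p.2 > 40 ∨ p.2 < 20)))).map Prod.fst) := by
  have hgen : ∀ (a b : List String),
      l.foldl
        (fun (st : List String × List String) p =>
          if p.2 > 40 ∨ p.2 < 20 then (st.1 ++ [p.1], st.2) else (st.1, st.2 ++ [p.1]))
        (a, b)
      = (a ++ (l.filter (fun p => decide (p.2 > 40 ∨ p.2 < 20))).map Prod.fst,
         b ++ (l.filter (fun p => decide (¬(p.2 > 40 ∨ p.2 < 20)))).map Prod.fst) := by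
    induction l with
    | nil => simp
    | cons p t ih =>
      intro a b
      by_cases h : p.2 > 40 ∨ p.2 < 20
      · have h' : ¬(p.2 ≤ 40 ∧ 20 ≤ p.2) := by omega
        simp [List.foldl_cons, h, h', ih]
      · have h' : p.2 ≤ 40 ∧ 20 ≤ p.2 := by omega
        simp [List.foldl_cons, h, h', ih]
  simpa using hgen [] []

-- ===== VERDICT (by name: the statement is the Claim_ definition above) =====
theorem two_teams_spec : Claim_equal_two_teams := by
  intro sailors _
  unfold Spec_two_teams
  simp only [two_teams, two_teams_alt]
  rw [fold_append_split, fold_split]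
  rw [List.cons.injEq, List.cons.injEq]
  exact ⟨fold_insert_eq_sorted _, fold_insert_eq_sorted _, rfl⟩
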